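-- pv_equiv track=rewrite | github.com/nocarsp101/bid-guardrail | backend/app/pdf_extraction/office_workflow.py | _build_queue_summary
-- ===== SOURCE A (Python) =====
-- from typing import Any, Dict, Iterable, List, Optional, Tuple
--
-- STATE_OPEN = "open"
--
-- STATE_REVIEWED = "reviewed"
--
-- STATE_RESOLVED = "resolved"
--
-- STATE_DEFERRED = "deferred"
--
-- def _build_queue_summary(queue: List[Dict[str, Any]]) -> Dict[str, Any]:
--     rows_total = len(queue)
--     priority_open = {
--         "critical_open": 0, "high_open": 0, "medium_open": 0,
--         "low_open": 0, "informational_open": 0,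
--     }
--     rows_reviewed = 0
--     rows_resolved = 0
--     rows_deferred = 0
--     rows_unreviewed = 0
--
--     for r in queue:
--         state = r.get("review_state", STATE_OPEN)
--         priority = r.get("priority_class")
--         if state == STATE_OPEN:
--             rows_unreviewed += 1
--             key = f"{priority}_open"
--             if key in priority_open:
--                 priority_open[key] += 1
--         elif state == STATE_REVIEWED:
--             rows_reviewed += 1
--         elif state == STATE_RESOLVED:
--             rows_resolved += 1
--         elif state == STATE_DEFERRED:
--             rows_deferred += 1
--
--     return {
--         "rows_total": rows_total,
--         "rows_unreviewed": rows_unreviewed,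
--         "rows_reviewed": rows_reviewed,
--         "rows_resolved": rows_resolved,
--         "rows_deferred": rows_deferred,
--         **priority_open,
--     }
-- ===== SOURCE B (Python) =====
-- def _build_queue_summary(queue):
--     # Output-driven: one dedicated counting scan per summary key (no per-row tally tables).
--     def state(r):
--         return r.get("review_state", "open")
--
--     def count(pred):
--         return sum(1 for r in queue if pred(r))
--
--     out = {"rows_total": len(queue)}
--     for name, s in (("unreviewed", "open"), ("reviewed", "reviewed"),
--                     ("resolved", "resolved"), ("deferred", "deferred")):
--         out["rows_" + name] = count(lambda r, s=s: state(r) == s)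
--     for p in ("critical", "high", "medium", "low", "informational"):
--         out[p + "_open"] = count(
--             lambda r, p=p: state(r) == "open" and r.get("priority_class") == p)
--     return out
-- ===== Notes on version B (the rewrite author's own statement) =====
-- stated objective: alternative
-- what changed: A makes one row-wise pass whose per-row branch bumps interleaved counters and a mutable priority dict; B is output-driven: it iterates over the nine fixed summary keys and computes each value by its own dedicated predicate-counting scan of the queue (column-wise, no tally state at all).
import Mathlib
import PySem

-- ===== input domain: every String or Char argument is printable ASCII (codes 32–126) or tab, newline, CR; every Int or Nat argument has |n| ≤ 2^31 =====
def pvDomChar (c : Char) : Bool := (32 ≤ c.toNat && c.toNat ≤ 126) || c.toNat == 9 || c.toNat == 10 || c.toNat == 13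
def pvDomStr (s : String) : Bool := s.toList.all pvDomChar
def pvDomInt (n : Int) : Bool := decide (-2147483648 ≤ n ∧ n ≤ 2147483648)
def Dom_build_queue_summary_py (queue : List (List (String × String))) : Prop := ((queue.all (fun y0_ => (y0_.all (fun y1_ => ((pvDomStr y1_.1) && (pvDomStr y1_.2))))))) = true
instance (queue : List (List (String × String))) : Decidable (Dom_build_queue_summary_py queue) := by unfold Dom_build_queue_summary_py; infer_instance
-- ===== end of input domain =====

-- B replaces A's single row-wise pass (a per-row branch bumping interleaved counters and a
-- mutable priority dict) by an output-driven construction: it walks the nine fixed summary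
-- keys and computes each value with its own dedicated predicate-counting scan of the queue
-- (objective: alternative decomposition, same asymptotic cost).

-- r.get("review_state", "open") — shared by both sources, each calls it the same way
def pvStateOf (r : List (String × String)) : String :=
  (PySem.Dict.mk r).getD "review_state" "open"

-- r.get("priority_class") (None → none)
def pvPrioOf (r : List (String × String)) : Option String :=
  (PySem.Dict.mk r).get? "priority_class"

-- ===== PORT A =====
-- the body of A's for-loop: state = (priority_open, rows_unreviewed, rows_reviewed, rows_resolved, rows_deferred)
def pvStepA (acc : PySem.Dict String Int × Int × Int × Int × Int) (r : List (String × String)) :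
    PySem.Dict String Int × Int × Int × Int × Int :=
  let (po, unrev, rev, res, defd) := acc
  let state := pvStateOf r
  let priority := pvPrioOf r
  if state = "open" then
    -- key = f"{priority}_open" ; if key in priority_open: priority_open[key] += 1
    let key := (match priority with | some p => p | none => "None") ++ "_open"
    if po.contains key then (po.modify key 0 (· + 1), unrev + 1, rev, res, defd)
    else (po, unrev + 1, rev, res, defd)
  else if state = "reviewed" then (po, unrev, rev + 1, res, defd)
  else if state = "resolved" then (po, unrev, rev, res + 1, defd)
  else if state = "deferred" then (po, unrev, rev, res, defd + 1)
  else (po, unrev, rev, res, defd)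

def build_queue_summary_py (queue : List (List (String × String))) : List (String × Int) :=
  let rows_total : Int := (queue.length : Int)
  let priority_open : PySem.Dict String Int :=
    ⟨[("critical_open", 0), ("high_open", 0), ("medium_open", 0),
      ("low_open", 0), ("informational_open", 0)]⟩
  let fin := queue.foldl pvStepA (priority_open, 0, 0, 0, 0)
  [("rows_total", rows_total), ("rows_unreviewed", fin.2.1), ("rows_reviewed", fin.2.2.1),
   ("rows_resolved", fin.2.2.2.1), ("rows_deferred", fin.2.2.2.2)] ++ fin.1.items

-- ===== PORT B =====
-- count(pred) = sum(1 for r in queue if pred(r))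
def pvCountB (queue : List (List (String × String))) (pred : List (String × String) → Bool) : Int :=
  queue.foldl (fun acc r => if pred r then acc + 1 else acc) 0

def build_queue_summary_py_alt (queue : List (List (String × String))) : List (String × Int) :=
  -- out = {"rows_total": len(queue)}; then one count(...) scan per remaining key
  ("rows_total", (queue.length : Int)) ::
  ([("unreviewed", "open"), ("reviewed", "reviewed"),
    ("resolved", "resolved"), ("deferred", "deferred")].map
     (fun ns => ("rows_" ++ ns.1, pvCountB queue (fun r => pvStateOf r == ns.2))))
  ++ ["critical", "high", "medium", "low", "informational"].map
     (fun p => (p ++ "_open",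
        pvCountB queue (fun r => pvStateOf r == "open" && pvPrioOf r == some p)))

-- ===== PRECONDITION & SPEC =====
def Spec_build_queue_summary_py (queue : List (List (String × String))) (out : List (String × Int)) : Prop := out = build_queue_summary_py_alt queue
instance (queue : List (List (String × String))) (out : List (String × Int)) : Decidable (Spec_build_queue_summary_py queue out) := by unfold Spec_build_queue_summary_py; infer_instance

-- ===== CLAIM (what is proved, stated in full; the proofs are below) =====
def Claim_equal_build_queue_summary_py : Prop := ∀ (queue : List (List (String × String))), Dom_build_queue_summary_py queue → Spec_build_queue_summary_py queue (build_queue_summary_py queue)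

-- ===== LEMMAS AND PROOFS =====

-- counts used to characterise A's loop
def pvNS (queue : List (List (String × String))) (s : String) : Int :=
  ((queue.map pvStateOf).count s : Int)

def pvNP (queue : List (List (String × String))) (p : String) : Int :=
  (((queue.filter (fun r => pvStateOf r = "open")).map pvPrioOf).count (some p) : Int)

lemma pv_append_open_ne {p q : String} (h : p ≠ q) : p ++ "_open" ≠ q ++ "_open" := by
  intro he; apply h
  have h2 := congrArg String.toList he
  simp [String.toList_append] at h2
  exact String.toList_inj.mp h2

lemma pv_key_ne {p q t : String} (h : p ≠ q) (ht : q ++ "_open" = t) : t ≠ p ++ "_open" :=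
  fun he => pv_append_open_ne h (ht ▸ he.symm)

lemma pvNS_cons (r : List (String × String)) (q : List (List (String × String))) (s : String) :
    pvNS (r :: q) s = (if pvStateOf r = s then 1 else 0) + pvNS q s := by
  simp only [pvNS, List.map_cons, List.count_cons, beq_iff_eq]
  split_ifs with h <;> push_cast <;> omega

lemma pvNP_cons (r : List (String × String)) (q : List (List (String × String))) (p : String) :
    pvNP (r :: q) p =
      (if pvStateOf r = "open" ∧ pvPrioOf r = some p then 1 else 0) + pvNP q p := by
  simp only [pvNP, List.filter_cons]
  by_cases hs : pvStateOf r = "open"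
  · simp only [hs, decide_true, if_true, List.map_cons, List.count_cons, beq_iff_eq, true_and]
    by_cases hp : pvPrioOf r = some p <;> simp [hp] <;> omega
  · simp [hs]

-- A's loop, fully characterised with a generalised accumulator
lemma pv_foldA (queue : List (List (String × String)))
    (v1 v2 v3 v4 v5 u a b c : Int) :
    queue.foldl pvStepA
      (PySem.Dict.mk [("critical_open", v1), ("high_open", v2), ("medium_open", v3),
         ("low_open", v4), ("informational_open", v5)], u, a, b, c) =
    (PySem.Dict.mk [("critical_open", v1 + pvNP queue "critical"), ("high_open", v2 + pvNP queue "high"),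
       ("medium_open", v3 + pvNP queue "medium"), ("low_open", v4 + pvNP queue "low"),
       ("informational_open", v5 + pvNP queue "informational")],
     u + pvNS queue "open", a + pvNS queue "reviewed",
     b + pvNS queue "resolved", c + pvNS queue "deferred") := by
  induction queue generalizing v1 v2 v3 v4 v5 u a b c with
  | nil => simp [pvNS, pvNP]
  | cons r q ih =>
    simp only [List.foldl_cons]
    by_cases hs : pvStateOf r = "open"
    · rcases hp : pvPrioOf r with _ | p
      · -- priority None: key "None_open" not present
        have hstep : pvStepA (PySem.Dict.mk [("critical_open", v1), ("high_open", v2), ("medium_open", v3),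
            ("low_open", v4), ("informational_open", v5)], u, a, b, c) r =
            (PySem.Dict.mk [("critical_open", v1), ("high_open", v2), ("medium_open", v3),
               ("low_open", v4), ("informational_open", v5)], u + 1, a, b, c) := by
          simp [pvStepA, hs, hp, PySem.Dict.contains_mk]
        rw [hstep, ih]
        simp [pvNS_cons, pvNP_cons, hs, hp]
        omega
      · by_cases h1 : p = "critical"
        case pos =>
          subst h1
          have hstep : pvStepA (PySem.Dict.mk [("critical_open", v1), ("high_open", v2), ("medium_open", v3),
              ("low_open", v4), ("informational_open", v5)], u, a, b, c) r =
              (PySem.Dict.mk [("critical_open", v1 + 1), ("high_open", v2), ("medium_open", v3),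
                 ("low_open", v4), ("informational_open", v5)], u + 1, a, b, c) := by
            simp [pvStepA, hs, hp, PySem.Dict.contains_mk, PySem.Dict.modify,
                  PySem.Dict.insert, PySem.Dict.getD, PySem.Dict.get?]
          rw [hstep, ih]
          simp [pvNS_cons, pvNP_cons, hs, hp]
          omega
        case neg =>
        by_cases h2 : p = "high"
        case pos =>
          subst h2
          have hstep : pvStepA (PySem.Dict.mk [("critical_open", v1), ("high_open", v2), ("medium_open", v3),
              ("low_open", v4), ("informational_open", v5)], u, a, b, c) r =
              (PySem.Dict.mk [("critical_open", v1), ("high_open", v2 + 1), ("medium_open", v3),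
                 ("low_open", v4), ("informational_open", v5)], u + 1, a, b, c) := by
            simp [pvStepA, hs, hp, PySem.Dict.contains_mk, PySem.Dict.modify,
                  PySem.Dict.insert, PySem.Dict.getD, PySem.Dict.get?]
          rw [hstep, ih]
          simp [pvNS_cons, pvNP_cons, hs, hp]
          omega
        case neg =>
        by_cases h3 : p = "medium"
        case pos =>
          subst h3
          have hstep : pvStepA (PySem.Dict.mk [("critical_open", v1), ("high_open", v2), ("medium_open", v3),
              ("low_open", v4), ("informational_open", v5)], u, a, b, c) r =
              (PySem.Dict.mk [("critical_open", v1), ("high_open", v2), ("medium_open", v3 + 1),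
                 ("low_open", v4), ("informational_open", v5)], u + 1, a, b, c) := by
            simp [pvStepA, hs, hp, PySem.Dict.contains_mk, PySem.Dict.modify,
                  PySem.Dict.insert, PySem.Dict.getD, PySem.Dict.get?]
          rw [hstep, ih]
          simp [pvNS_cons, pvNP_cons, hs, hp]
          omega
        case neg =>
        by_cases h4 : p = "low"
        case pos =>
          subst h4
          have hstep : pvStepA (PySem.Dict.mk [("critical_open", v1), ("high_open", v2), ("medium_open", v3),
              ("low_open", v4), ("informational_open", v5)], u, a, b, c) r =
              (PySem.Dict.mk [("critical_open", v1), ("high_open", v2), ("medium_open", v3),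
                 ("low_open", v4 + 1), ("informational_open", v5)], u + 1, a, b, c) := by
            simp [pvStepA, hs, hp, PySem.Dict.contains_mk, PySem.Dict.modify,
                  PySem.Dict.insert, PySem.Dict.getD, PySem.Dict.get?]
          rw [hstep, ih]
          simp [pvNS_cons, pvNP_cons, hs, hp]
          omega
        case neg =>
        by_cases h5 : p = "informational"
        case pos =>
          subst h5
          have hstep : pvStepA (PySem.Dict.mk [("critical_open", v1), ("high_open", v2), ("medium_open", v3),
              ("low_open", v4), ("informational_open", v5)], u, a, b, c) r =
              (PySem.Dict.mk [("critical_open", v1), ("high_open", v2), ("medium_open", v3),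
                 ("low_open", v4), ("informational_open", v5 + 1)], u + 1, a, b, c) := by
            simp [pvStepA, hs, hp, PySem.Dict.contains_mk, PySem.Dict.modify,
                  PySem.Dict.insert, PySem.Dict.getD, PySem.Dict.get?]
          rw [hstep, ih]
          simp [pvNS_cons, pvNP_cons, hs, hp]
          omega
        case neg =>
          have hstep : pvStepA (PySem.Dict.mk [("critical_open", v1), ("high_open", v2), ("medium_open", v3),
              ("low_open", v4), ("informational_open", v5)], u, a, b, c) r =
              (PySem.Dict.mk [("critical_open", v1), ("high_open", v2), ("medium_open", v3),
                 ("low_open", v4), ("informational_open", v5)], u + 1, a, b, c) := by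
            have k1 : "critical_open" ≠ p ++ "_open" := pv_key_ne h1 (by decide)
            have k2 : "high_open" ≠ p ++ "_open" := pv_key_ne h2 (by decide)
            have k3 : "medium_open" ≠ p ++ "_open" := pv_key_ne h3 (by decide)
            have k4 : "low_open" ≠ p ++ "_open" := pv_key_ne h4 (by decide)
            have k5 : "informational_open" ≠ p ++ "_open" := pv_key_ne h5 (by decide)
            simp [pvStepA, hs, hp, PySem.Dict.contains_mk, k1, k2, k3, k4, k5]
          rw [hstep, ih]
          simp [pvNS_cons, pvNP_cons, hs, hp, h1, h2, h3, h4, h5]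
          omega
    · have hstep : ∀ po : PySem.Dict String Int, pvStepA (po, u, a, b, c) r =
          (po, u, (if pvStateOf r = "reviewed" then a + 1 else a),
            (if pvStateOf r = "resolved" then b + 1 else b),
            (if pvStateOf r = "deferred" then c + 1 else c)) := by
        intro po
        by_cases hr : pvStateOf r = "reviewed" <;>
          by_cases hv : pvStateOf r = "resolved" <;>
            by_cases hd : pvStateOf r = "deferred" <;>
              simp_all [pvStepA]
      rw [hstep, ih]
      have hnp : ∀ p', pvNP (r :: q) p' = pvNP q p' := by
        intro p'; rw [pvNP_cons]; simp [hs]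
      by_cases hr : pvStateOf r = "reviewed" <;>
        by_cases hv : pvStateOf r = "resolved" <;>
          by_cases hd : pvStateOf r = "deferred" <;>
            simp_all [pvNS_cons, hnp] <;> omega

-- B's count(pred) is a countP
lemma pvCountB_eq (queue : List (List (String × String))) (pred : List (String × String) → Bool) :
    pvCountB queue pred = (queue.countP pred : Int) := by
  simpa using PySem.List.foldl_count_if pred queue 0

-- A's state count is B's state scan
lemma pvNS_eq (queue : List (List (String × String))) (s : String) :
    pvNS queue s = pvCountB queue (fun r => pvStateOf r == s) := by
  rw [pvCountB_eq]
  induction queue with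
  | nil => simp [pvNS]
  | cons r q ih =>
    rw [pvNS_cons, List.countP_cons, ih]
    by_cases h : pvStateOf r = s <;> simp [h] <;> omega

-- A's open-priority count is B's conjunctive scan
lemma pvNP_eq (queue : List (List (String × String))) (p : String) :
    pvNP queue p = pvCountB queue (fun r => pvStateOf r == "open" && pvPrioOf r == some p) := by
  rw [pvCountB_eq]
  induction queue with
  | nil => simp [pvNP]
  | cons r q ih =>
    rw [pvNP_cons, List.countP_cons, ih]
    by_cases hs : pvStateOf r = "open" <;> by_cases hp : pvPrioOf r = some p <;>
      simp [hs, hp] <;> omega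

-- ===== VERDICT (by name: the statement is the Claim_ definition above) =====
theorem build_queue_summary_py_spec : Claim_equal_build_queue_summary_py := by
  intro queue _
  unfold Spec_build_queue_summary_py build_queue_summary_py build_queue_summary_py_alt
  have hA := pv_foldA queue 0 0 0 0 0 0 0 0 0
  simp only [hA, List.map_cons, List.map_nil, PySem.Dict.items]
  simp [pvNS_eq, pvNP_eq]
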